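-- pv_equiv track=rewrite | github.com/hughdbrown/who-is-hiring | analyze-data.py | make_display
-- ===== SOURCE A (Python) =====
-- def make_display(co_dates, dates):
--     display = []
--     i = 0
--     for date in dates:
--         if i < len(co_dates) and date == co_dates[i]:
--             display.append('X')
--             i += 1
--         else:
--             display.append('.')
--     return "".join(display)
-- ===== SOURCE B (Python) =====
-- def make_display(co_dates, dates):
--     parts = []
--     pos = 0
--     for cd in co_dates:
--         try:
--             j = dates.index(cd, pos)
--         except ValueError:
--             break
--         parts.append('.' * (j - pos))
--         parts.append('X')
--         pos = j + 1
--     parts.append('.' * (len(dates) - pos))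
--     return ''.join(parts)
-- ===== Notes on version B (the rewrite author's own statement) =====
-- stated objective: alternative
-- what changed: Instead of A's single pass over dates with a cursor into co_dates, B iterates over co_dates, locating each one by a forward dates.index(cd, pos) search, emitting a dot-segment plus 'X' per hit and one dot-tail when a co_date is absent or co_dates is exhausted.
import Mathlib
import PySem

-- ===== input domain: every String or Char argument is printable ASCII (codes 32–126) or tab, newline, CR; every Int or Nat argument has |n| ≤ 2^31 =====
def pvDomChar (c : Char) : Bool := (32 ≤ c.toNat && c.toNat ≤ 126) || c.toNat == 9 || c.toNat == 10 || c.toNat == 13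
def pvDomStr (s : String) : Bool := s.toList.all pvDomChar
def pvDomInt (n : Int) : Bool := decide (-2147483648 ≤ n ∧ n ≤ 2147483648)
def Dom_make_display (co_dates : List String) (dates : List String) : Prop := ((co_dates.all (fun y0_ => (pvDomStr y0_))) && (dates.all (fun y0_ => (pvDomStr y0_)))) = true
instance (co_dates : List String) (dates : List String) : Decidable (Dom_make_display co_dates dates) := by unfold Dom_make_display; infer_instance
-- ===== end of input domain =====

-- B replaces A's single pass over `dates` (cursor into co_dates) by a loop over `co_dates`
-- that forward-searches the remaining suffix of `dates` and emits dot-segments (alternative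
-- decomposition, same cost). Both return the same string on every input.

-- ===== PORT A =====
-- A's loop over `dates`, carrying the cursor i; each appended one-char string is a Char,
-- ''.join of those is String.ofList (exact: every piece is 'X' or '.').
def mdAGo (co_dates : List String) : List String → Int → List Char
  | [], _ => []
  | date :: ds, i =>
    if i < (co_dates.length : Int) ∧ PySem.List.pyGet? co_dates i = some date then
      'X' :: mdAGo co_dates ds (i + 1)
    else
      '.' :: mdAGo co_dates ds i

def make_display (co_dates : List String) (dates : List String) : String :=
  String.ofList (mdAGo co_dates dates 0)

-- ===== PORT B =====
-- B's loop over co_dates with cursor pos: dates.index(cd, pos) scans dates from index pos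
-- (exact: CPython's list.index(v, start) finds the first j >= start with dates[j] == v,
-- ValueError = none); emit '.'*(j-pos) then 'X'; after the loop '.'*(len(dates)-pos);
-- ''.join of the pieces is String.ofList of the concatenated chars.
def listIndexFrom (xs : List String) (v : String) (start : Nat) : Option Nat :=
  (PySem.List.index? (xs.drop start) v).map (start + ·)

def mdBGo (dates : List String) : List String → Nat → List Char
  | [], pos => List.replicate (dates.length - pos) '.'
  | cd :: cds, pos =>
    match listIndexFrom dates cd pos with
    | none => List.replicate (dates.length - pos) '.'
    | some j => List.replicate (j - pos) '.' ++ 'X' :: mdBGo dates cds (j + 1)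

def make_display_alt (co_dates : List String) (dates : List String) : String :=
  String.ofList (mdBGo dates co_dates 0)

-- ===== PRECONDITION & SPEC =====
def Spec_make_display (co_dates : List String) (dates : List String) (out : String) : Prop := out = make_display_alt co_dates dates
instance (co_dates : List String) (dates : List String) (out : String) : Decidable (Spec_make_display co_dates dates out) := by unfold Spec_make_display; infer_instance

-- ===== CLAIM (what is proved, stated in full; the proofs are below) =====
def Claim_equal_make_display : Prop := ∀ (co_dates : List String) (dates : List String), Dom_make_display co_dates dates → Spec_make_display co_dates dates (make_display co_dates dates)

-- ===== LEMMAS AND PROOFS =====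

-- Proof helper: B's loop re-expressed on the remaining suffix of dates.
def mdBSuffix : List String → List String → List Char
  | [], rest => List.replicate rest.length '.'
  | cd :: cds, rest =>
    match PySem.List.index? rest cd with
    | none => List.replicate rest.length '.'
    | some j =>
      List.replicate j '.' ++ 'X' :: mdBSuffix cds (PySem.List.slice rest (some ((j : Int) + 1)))

theorem mdBGo_eq_suffix (dates co : List String) (pos : Nat) :
    mdBGo dates co pos = mdBSuffix co (dates.drop pos) := by
  induction co generalizing pos with
  | nil => simp [mdBGo, mdBSuffix]
  | cons cd cds ih =>
    rw [mdBGo, mdBSuffix]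
    unfold listIndexFrom
    rcases hidx : PySem.List.index? (dates.drop pos) cd with _ | i
    · simp
    · simp only [Option.map_some]
      have hs : PySem.List.slice (dates.drop pos) (some ((i : Int) + 1))
          = dates.drop (pos + i + 1) := by
        rw [PySem.List.slice_from _ (by omega)]
        rw [List.drop_drop]
        congr 1
      rw [hs, ih (pos + i + 1)]
      have h1 : pos + i - pos = i := by omega
      rw [h1]


-- Head-matching view of A's loop: the cursor i is the number of co_dates already consumed.
def mdA' : List String → List String → List Char
  | _, [] => []
  | [], _ :: ds => '.' :: mdA' [] ds
  | c :: cs, d :: ds =>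
    if d = c then 'X' :: mdA' cs ds else '.' :: mdA' (c :: cs) ds

theorem mdAGo_eq_mdA' (co : List String) (ds : List String) (i : Nat) :
    mdAGo co ds (i : Int) = mdA' (co.drop i) ds := by
  induction ds generalizing i with
  | nil => cases co.drop i <;> simp [mdAGo, mdA']
  | cons d ds ih =>
    have hcond : ((i : Int) < (co.length : Int) ∧ PySem.List.pyGet? co (i : Int) = some d)
        ↔ (∃ c cs, co.drop i = c :: cs ∧ d = c) := by
      constructor
      · rintro ⟨hlt, hget⟩
        have hi : i < co.length := by exact_mod_cast hlt
        rw [PySem.List.pyGet?_natCast] at hget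
        refine ⟨co[i], co.drop (i+1), ?_, ?_⟩
        · exact (List.drop_eq_getElem_cons hi)
        · simpa [List.getElem?_eq_getElem hi] using hget.symm
      · rintro ⟨c, cs, hdrop, rfl⟩
        have hi : i < co.length := by
          by_contra h
          rw [List.drop_eq_nil_of_le (by omega)] at hdrop
          exact absurd hdrop (by simp)
        refine ⟨by exact_mod_cast hi, ?_⟩
        rw [PySem.List.pyGet?_natCast]
        have : co[i]? = (co.drop i)[0]? := by simp
        rw [this, hdrop]; simp
    rcases h : co.drop i with _ | ⟨c, cs⟩
    · have : ¬ ((i : Int) < (co.length : Int) ∧ PySem.List.pyGet? co (i : Int) = some d) := by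
        rw [hcond]; rintro ⟨c, cs, hc, _⟩; rw [h] at hc; exact absurd hc (by simp)
      simp only [mdAGo, if_neg this, mdA']
      rw [ih i, h]
    · by_cases hd : d = c
      · have hc2 : ((i : Int) < (co.length : Int) ∧ PySem.List.pyGet? co (i : Int) = some d) := by
          rw [hcond]; exact ⟨c, cs, h, hd⟩
        simp only [mdAGo, if_pos hc2, mdA', if_pos hd]
        have h1 : (i : Int) + 1 = ((i + 1 : Nat) : Int) := by push_cast; ring
        rw [h1, ih (i+1)]
        congr 1
        rw [← List.tail_drop, h]
        rfl
      · have hc2 : ¬ ((i : Int) < (co.length : Int) ∧ PySem.List.pyGet? co (i : Int) = some d) := by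
          rw [hcond]; rintro ⟨c', cs', hc', rfl⟩
          rw [h] at hc'; injection hc' with h1 _; exact hd h1.symm
        simp only [mdAGo, if_neg hc2, mdA', if_neg hd]
        rw [ih i, h]

theorem mdA'_nil (ds : List String) : mdA' [] ds = List.replicate ds.length '.' := by
  induction ds with
  | nil => simp [mdA']
  | cons d ds ih => simp [mdA', ih, List.replicate_succ]

theorem mdA'_not_mem (cd : String) (cds ds : List String) (h : cd ∉ ds) :
    mdA' (cd :: cds) ds = List.replicate ds.length '.' := by
  induction ds with
  | nil => simp [mdA']
  | cons d ds ih =>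
    have hd : d ≠ cd := fun he => h (by simp [he])
    simp only [mdA', if_neg hd]
    rw [ih (fun hm => h (by simp [hm]))]
    simp [List.replicate_succ]

theorem mdA'_eq_mdBSuffix (ds co : List String) : mdA' co ds = mdBSuffix co ds := by
  induction ds generalizing co with
  | nil =>
    cases co with
    | nil => simp [mdA', mdBSuffix]
    | cons cd cds => simp [mdA', mdBSuffix, PySem.List.index?]
  | cons d ds ih =>
    cases co with
    | nil => rw [mdA'_nil, mdBSuffix]
    | cons cd cds =>
      by_cases hd : d = cd
      · subst hd
        rw [mdBSuffix, PySem.List.index?_cons_self]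
        have hs : PySem.List.slice (d :: ds) (some (((0 : Nat) : Int) + 1)) = ds := by
          rw [PySem.List.slice_from _ (by omega)]; simp
        simp only [mdA', hs, List.replicate, List.nil_append]
        rw [ih cds]
        simp
      · have hidx0 : PySem.List.index? (d :: ds) cd
            = (PySem.List.index? ds cd).map (· + 1) :=
          PySem.List.index?_cons_of_ne _ hd
        rcases hidx : PySem.List.index? ds cd with _ | j
        · have hnm : cd ∉ d :: ds := by
            have : cd ∉ ds := (PySem.List.index?_eq_none_iff _ _).mp hidx
            simp [Ne.symm hd, this]
          rw [mdA'_not_mem cd cds _ hnm, mdBSuffix, hidx0, hidx]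
          simp
        · have h1 : PySem.List.slice ds (some ((j : Int) + 1)) = ds.drop (j + 1) := by
            rw [PySem.List.slice_from _ (by omega)]
            norm_num
          have h2 : PySem.List.slice (d :: ds) (some (((j + 1 : Nat) : Int) + 1))
              = ds.drop (j + 1) := by
            rw [PySem.List.slice_from _ (by omega)]
            have ht : ((((j + 1 : Nat) : Int)) + 1).toNat = j + 2 := by omega
            rw [ht, List.drop_succ_cons]
          simp only [mdA', if_neg hd]
          rw [ih (cd :: cds)]
          conv_lhs => rw [mdBSuffix, hidx]
          conv_rhs => rw [mdBSuffix, hidx0, hidx]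
          simp only [Option.map_some, h1, h2]
          simp [List.replicate_succ]

-- ===== VERDICT (by name: the statement is the Claim_ definition above) =====
theorem make_display_spec : Claim_equal_make_display := by
  intro co_dates dates _
  unfold Spec_make_display make_display make_display_alt
  have h0 : (0 : Int) = ((0 : Nat) : Int) := rfl
  rw [h0, mdAGo_eq_mdA' co_dates dates 0, mdBGo_eq_suffix dates co_dates 0]
  simp [mdA'_eq_mdBSuffix]
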